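-- pv_equiv track=rewrite | github.com/ferbachega/MastersGUI2 | modules/pdbmodules.py | AddABSequenceToText
-- ===== SOURCE A (Python) =====
-- def AddABSequenceToText(text, ABsequence):
--     #--------------------------------------------------------------------------#
--     text = text + '\nREMARK'                                                   #
--     text = text + '\nREMARK     - - protein ABsequence - - '                   #
--     line = '\nREMARK  ABSEQUEN:  '                                             #
--     n = 1                                                                      #
--     for i in ABsequence:                                                       #
--         if n >= 56:                                                            #
--             n = 1                                                              #
--             line =  line +  '\nREMARK  ABSEQUEN:  ' + i                        #
--         else:                                                                  #
--             line =  line + i                                                   #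
--         n = n+1                                                                #
--     text = text + line                                                         #
--     text = text + '\nREMARK'                                                   #
--     return text                                                                #
-- ===== SOURCE B (Python) =====
-- def AddABSequenceToText(text, ABsequence):
--     prefix = '\nREMARK  ABSEQUEN:  '
--     chunks = [ABsequence[i:i+55] for i in range(0, len(ABsequence), 55)]
--     body = prefix + prefix.join(chunks)
--     return (text + '\nREMARK' + '\nREMARK     - - protein ABsequence - - '
--             + body + '\nREMARK')
-- ===== Notes on version B (the rewrite author's own statement) =====
-- stated objective: faster
-- what changed: B slices ABsequence into blocks of 55 via range(0,len,55) and joins them with the REMARK prefix, replacing A's per-character loop with a line counter and repeated string concatenation.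
import Mathlib
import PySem

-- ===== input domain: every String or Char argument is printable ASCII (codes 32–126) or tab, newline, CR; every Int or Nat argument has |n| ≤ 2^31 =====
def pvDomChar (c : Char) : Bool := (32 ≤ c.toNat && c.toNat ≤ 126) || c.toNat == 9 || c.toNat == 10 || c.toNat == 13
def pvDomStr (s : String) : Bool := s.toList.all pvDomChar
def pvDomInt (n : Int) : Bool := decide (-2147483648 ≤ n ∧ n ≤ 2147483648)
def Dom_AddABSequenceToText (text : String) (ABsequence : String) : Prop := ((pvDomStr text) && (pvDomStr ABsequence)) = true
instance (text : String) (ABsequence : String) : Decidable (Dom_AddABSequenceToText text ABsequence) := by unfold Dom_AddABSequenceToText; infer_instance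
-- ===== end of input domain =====

-- B replaces A's per-character loop (repeated string concatenation with a line counter)
-- by slicing ABsequence into blocks of 55 and joining them with the REMARK prefix (faster).

-- shared string literals (the REMARK prefix and headers), as char lists
def pvPfx : List Char := "\nREMARK  ABSEQUEN:  ".toList
def pvHdr : List Char := "\nREMARK".toList
def pvHdr2 : List Char := "\nREMARK     - - protein ABsequence - - ".toList

-- ===== PORT A =====
-- literal transliteration of A: fold over the characters with state (line, n)
def AddABSequenceToText (text : String) (ABsequence : String) : String :=
  String.ofList (text.toList ++ pvHdr ++ pvHdr2 ++
    (ABsequence.toList.foldl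
      (fun (st : List Char × Nat) (i : Char) =>
        if st.2 ≥ 56 then (st.1 ++ pvPfx ++ [i], 2) else (st.1 ++ [i], st.2 + 1))
      (pvPfx, 1)).1 ++ pvHdr)

-- ===== PORT B =====
-- literal transliteration of B: slice into blocks of 55 via range(0, len, 55), join with the prefix
def AddABSequenceToText_alt (text : String) (ABsequence : String) : String :=
  String.ofList (text.toList ++ pvHdr ++ pvHdr2 ++
    (pvPfx ++ PySem.Chars.join pvPfx
      ((PySem.List.pyRange 0 (ABsequence.toList.length : Int) 55).map
        (fun i => PySem.List.slice ABsequence.toList (some i) (some (i + 55))))) ++ pvHdr)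

-- ===== PRECONDITION & SPEC =====
def Spec_AddABSequenceToText (text : String) (ABsequence : String) (out : String) : Prop := out = AddABSequenceToText_alt text ABsequence
instance (text : String) (ABsequence : String) (out : String) : Decidable (Spec_AddABSequenceToText text ABsequence out) := by unfold Spec_AddABSequenceToText; infer_instance

-- ===== CLAIM (what is proved, stated in full; the proofs are below) =====
def Claim_equal_AddABSequenceToText : Prop := ∀ (text : String) (ABsequence : String), Dom_AddABSequenceToText text ABsequence → Spec_AddABSequenceToText text ABsequence (AddABSequenceToText text ABsequence)

-- ===== LEMMAS AND PROOFS =====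

-- the blocks of 55 characters
def chunks55 (cs : List Char) : List (List Char) :=
  if h : cs = [] then [] else cs.take 55 :: chunks55 (cs.drop 55)
termination_by cs.length
decreasing_by
  have : 0 < cs.length := List.length_pos_iff.mpr h
  simp only [List.length_drop]; omega

-- the tail of the wrapped body: each further block on its own prefixed line
def pvJ (cs : List Char) : List Char :=
  if h : cs = [] then [] else pvPfx ++ cs.take 55 ++ pvJ (cs.drop 55)
termination_by cs.length
decreasing_by
  have : 0 < cs.length := List.length_pos_iff.mpr h
  simp only [List.length_drop]; omega

theorem chunks55_nil : chunks55 [] = [] := by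
  rw [chunks55.eq_def]; simp

theorem chunks55_cons (cs : List Char) (h : cs ≠ []) :
    chunks55 cs = cs.take 55 :: chunks55 (cs.drop 55) := by
  rw [chunks55.eq_def, dif_neg h]

theorem pvJ_nil : pvJ [] = [] := by
  rw [pvJ.eq_def]; simp

theorem pvJ_cons (cs : List Char) (h : cs ≠ []) :
    pvJ cs = pvPfx ++ cs.take 55 ++ pvJ (cs.drop 55) := by
  rw [pvJ.eq_def, dif_neg h]

-- A's loop written as structural recursion
def loopA : List Char → List Char → Nat → List Char
  | [], line, _ => line
  | c :: cs, line, n =>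
      if n ≥ 56 then loopA cs (line ++ pvPfx ++ [c]) 2 else loopA cs (line ++ [c]) (n + 1)

theorem foldl_eq_loopA (cs : List Char) : ∀ (line : List Char) (n : Nat),
    (cs.foldl (fun (st : List Char × Nat) (i : Char) =>
        if st.2 ≥ 56 then (st.1 ++ pvPfx ++ [i], 2) else (st.1 ++ [i], st.2 + 1))
      (line, n)).1 = loopA cs line n := by
  induction cs with
  | nil => intro line n; simp [loopA]
  | cons c cs ih =>
      intro line n
      simp only [List.foldl_cons, loopA]
      by_cases h : n ≥ 56
      · simp only [if_pos h]
        exact ih _ 2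
      · simp only [if_neg h]
        exact ih _ (n + 1)

theorem loopA_eq (cs : List Char) : ∀ (line : List Char) (n : Nat), 1 ≤ n → n ≤ 56 →
    loopA cs line n = line ++ cs.take (56 - n) ++ pvJ (cs.drop (56 - n)) := by
  induction cs with
  | nil => intro line n _ _; simp [loopA, pvJ_nil]
  | cons c cs ih =>
      intro line n h1 h2
      by_cases h : n ≥ 56
      · have hn : n = 56 := le_antisymm h2 h
        subst hn
        simp only [loopA, ge_iff_le, le_refl, if_true]
        rw [ih _ 2 (by omega) (by omega)]
        have e0 : (56 : Nat) - 56 = 0 := rfl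
        have e2 : (56 : Nat) - 2 = 54 := rfl
        rw [e0, e2, List.take_zero, List.drop_zero]
        rw [pvJ_cons (c :: cs) (List.cons_ne_nil c cs)]
        rw [show (55 : Nat) = 54 + 1 from rfl, List.take_succ_cons, List.drop_succ_cons]
        simp [List.append_assoc]
      · simp only [loopA, if_neg h]
        rw [ih _ (n + 1) (by omega) (by omega)]
        have h56 : 56 - n = (56 - (n + 1)) + 1 := by omega
        rw [h56, List.take_succ_cons, List.drop_succ_cons]
        simp [List.append_assoc]

-- range(a, b, 55) steps by one block
theorem pyRange55_nil (a b : Int) (h : b ≤ a) : PySem.List.pyRange a b 55 = [] := by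
  rw [PySem.List.pyRange_of_pos a b (by norm_num)]
  rw [if_neg (by omega)]
  simp

theorem pyRange55_cons (a b : Int) (h : a < b) :
    PySem.List.pyRange a b 55 = a :: PySem.List.pyRange (a + 55) b 55 := by
  rw [PySem.List.pyRange_of_pos a b (by norm_num),
      PySem.List.pyRange_of_pos (a + 55) b (by norm_num)]
  have hc : (if a < b then ((b - a + 55 - 1) / 55).toNat else 0)
      = (if a + 55 < b then ((b - (a + 55) + 55 - 1) / 55).toNat else 0) + 1 := by
    split_ifs <;> omega
  rw [hc, List.range_succ_eq_map]
  simp only [List.map_cons, List.map_map]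
  congr 1
  · push_cast; ring
  · apply List.map_congr_left
    intro k _
    simp only [Function.comp_apply]
    push_cast; ring

-- the comprehension over range(0, len, 55) produces exactly the blocks of 55
theorem mapSlice_eq_chunks (cs : List Char) : ∀ (k a : Nat), cs.length - a ≤ k →
    (PySem.List.pyRange (a : Int) (cs.length : Int) 55).map
        (fun i => PySem.List.slice cs (some i) (some (i + 55)))
      = chunks55 (cs.drop a) := by
  intro k
  induction k with
  | zero =>
      intro a ha
      have hla : cs.length ≤ a := by omega
      rw [pyRange55_nil _ _ (by exact_mod_cast hla)]
      rw [List.drop_eq_nil_of_le hla, chunks55_nil]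
      simp
  | succ k ih =>
      intro a ha
      by_cases hla : cs.length ≤ a
      · rw [pyRange55_nil _ _ (by exact_mod_cast hla)]
        rw [List.drop_eq_nil_of_le hla, chunks55_nil]
        simp
      · have hlt : (a : Int) < (cs.length : Int) := by
          exact_mod_cast Nat.lt_of_not_le hla
        rw [pyRange55_cons _ _ hlt, List.map_cons]
        have hsl : PySem.List.slice cs (some (a : Int)) (some ((a : Int) + 55))
            = (cs.drop a).take 55 := by
          have h := PySem.List.slice_natCast_add cs a 55
          push_cast at h
          exact h
        have hcast : (a : Int) + 55 = ((a + 55 : Nat) : Int) := by push_cast; ring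
        rw [hsl, hcast, ih (a + 55) (by omega)]
        rw [chunks55_cons (cs.drop a) (by
          intro hnil
          exact hla (List.drop_eq_nil_iff.mp hnil))]
        rw [List.drop_drop]

-- joining the blocks with the prefix gives the wrapped body of A's loop
theorem join_chunks_eq_aux : ∀ (k : Nat) (cs : List Char), cs.length ≤ k →
    PySem.Chars.join pvPfx (chunks55 cs) = cs.take 55 ++ pvJ (cs.drop 55) := by
  intro k
  induction k with
  | zero =>
      intro cs hlen
      have hcs : cs = [] := List.eq_nil_of_length_eq_zero (by omega)
      subst hcs
      rw [chunks55_nil, PySem.Chars.join_nil]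
      simp [pvJ_nil]
  | succ k ih =>
      intro cs hlen
      by_cases h : cs = []
      · subst h
        rw [chunks55_nil, PySem.Chars.join_nil]
        simp [pvJ_nil]
      · rw [chunks55_cons cs h]
        by_cases h2 : cs.drop 55 = []
        · rw [h2, chunks55_nil, PySem.Chars.join_singleton, pvJ_nil, List.append_nil]
        · obtain ⟨p, rest, hpr⟩ : ∃ p rest, chunks55 (cs.drop 55) = p :: rest := by
            rw [chunks55_cons _ h2]
            exact ⟨_, _, rfl⟩
          have hd : (cs.drop 55).length ≤ k := by
            have : 0 < cs.length := List.length_pos_iff.mpr h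
            simp only [List.length_drop]
            omega
          rw [hpr, PySem.Chars.join_cons_cons, ← hpr, ih (cs.drop 55) hd]
          rw [pvJ_cons _ h2]
          simp [List.append_assoc]

-- ===== VERDICT (by name: the statement is the Claim_ definition above) =====
theorem AddABSequenceToText_spec : Claim_equal_AddABSequenceToText := by
  intro text seq _
  unfold Spec_AddABSequenceToText AddABSequenceToText AddABSequenceToText_alt
  congr 1
  congr 1
  congr 1
  rw [foldl_eq_loopA, loopA_eq _ _ 1 (by omega) (by omega)]
  have h0 : ((0 : Int)) = ((0 : Nat) : Int) := by norm_cast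
  rw [h0, mapSlice_eq_chunks seq.toList seq.toList.length 0 (by omega)]
  rw [List.drop_zero, join_chunks_eq_aux seq.toList.length seq.toList le_rfl]
  simp [List.append_assoc]
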